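-- pv_equiv track=rewrite | github.com/maxspannring/Heuristic-Optimizaton-Techniques | exercise1.py | beam_search_partition
-- ===== SOURCE A (Python) =====
-- def build_qubo(A):
--     """Build QUBO matrix for the bipartition problem."""
--     n = len(A)
--     Q = [[0] * n for _ in range(n)]
--     total = sum(A)
--
--     for i in range(n):
--         Q[i][i] = 4 * A[i] ** 2 - 4 * A[i] * total  # Added linear term
--         for j in range(i + 1, n):
--             Q[i][j] = Q[j][i] = 4 * A[i] * A[j]
--     return Q
--
-- def evaluate_partial(x, Q):
--     """Evaluate partial assignment x."""
--     xv = [(0 if b is None else b) for b in x]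
--
--     val = 0
--     n = len(x)
--     for i in range(n):
--         for j in range(n):
--             val += xv[i] * Q[i][j] * xv[j]
--     return val
--
-- def beam_search_partition(A, beta=2):
--     """
--     Beam search for the QUBO bipartition.
--
--     A: list of numbers
--     beta: beam width
--     """
--     n = len(A)
--     Q = build_qubo(A)
--
--     # Root is completely unassigned: [None,...]
--     beam = [[None] * n]
--
--     for depth in range(n):
--         candidates = []
--
--         for node in beam:
--             # Branch: assign 0 or 1 to x[depth]
--             for bit in [0, 1]:
--                 new_node = node.copy()
--                 new_node[depth] = bit
--                 val = evaluate_partial(new_node, Q)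
--                 candidates.append((val, new_node))
--
--         # Keep only the best beta nodes
--         candidates.sort(key=lambda x: x[0])
--         beam = [node for (_, node) in candidates[:beta]]
--
--     # After full assignment: pick best from final beam
--     best_val, best_node = min(
--         [(evaluate_partial(node, Q), node) for node in beam],
--         key=lambda x: x[0]
--     )
--
--     # Translate to E and F
--     E = [a for a, x in zip(A, best_node) if x == 1]
--     F = [a for a, x in zip(A, best_node) if x == 0]
--
--     return best_node, E, F, best_val
-- ===== SOURCE B (Python) =====
-- def beam_search_partition(A, beta=2):
--     """Beam search for the QUBO bipartition, with incremental value updates.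
--
--     Each beam node is (val, s, prefix): val is the partial QUBO value of the
--     assigned prefix, s is the sum of A[j] over prefix bits set to 1.  No QUBO
--     matrix is built and no O(n^2) rescan per node is done.
--     """
--     n = len(A)
--     total = sum(A)
--
--     beam = [(0, 0, [])]
--     for d in range(n):
--         a = A[d]
--         candidates = []
--         for (val, s, prefix) in beam:
--             candidates.append((val, s, prefix + [0]))
--             candidates.append((val + 4 * a * a - 4 * a * total + 8 * a * s,
--                                s + a, prefix + [1]))
--         candidates.sort(key=lambda c: c[0])
--         beam = candidates[:beta]
--
--     best_val, _, best = min(beam, key=lambda c: c[0])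
--
--     E = [a for a, x in zip(A, best) if x == 1]
--     F = [a for a, x in zip(A, best) if x == 0]
--     return best, E, F, best_val
-- ===== Notes on version B (the rewrite author's own statement) =====
-- stated objective: faster
-- what changed: B never builds the n x n QUBO matrix and never rescans it: each beam node carries (partial value, sum of chosen elements, prefix) and a child's value is obtained by an O(1) incremental update, instead of A's O(n^2) evaluate_partial rescan per candidate.
import Mathlib
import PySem

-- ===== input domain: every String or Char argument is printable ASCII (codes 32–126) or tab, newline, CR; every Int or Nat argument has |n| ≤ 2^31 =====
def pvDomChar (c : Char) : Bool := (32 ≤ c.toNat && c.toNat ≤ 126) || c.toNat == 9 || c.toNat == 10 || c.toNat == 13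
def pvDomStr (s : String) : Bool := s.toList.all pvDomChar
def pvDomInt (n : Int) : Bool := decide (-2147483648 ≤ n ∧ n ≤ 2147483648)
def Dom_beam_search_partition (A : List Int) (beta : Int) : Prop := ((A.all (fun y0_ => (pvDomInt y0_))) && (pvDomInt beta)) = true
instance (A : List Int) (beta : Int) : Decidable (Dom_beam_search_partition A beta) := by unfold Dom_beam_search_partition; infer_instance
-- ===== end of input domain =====

-- B replaces A's n×n QUBO matrix and the O(n^2) rescan per candidate by an incremental
-- per-node update of the partial QUBO value (objective: faster).

-- ===== PORT A =====

-- inner 'for j in range(i+1, n)' loop body of build_qubo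
def build_qubo_inner (A : List Int) (i : Int) (Q : List (List Int)) (j : Int) : List (List Int) :=
  let v := 4 * PySem.List.pyGetD A i 0 * PySem.List.pyGetD A j 0
  let Q := PySem.List.pySetD Q i (PySem.List.pySetD (PySem.List.pyGetD Q i []) j v)
  PySem.List.pySetD Q j (PySem.List.pySetD (PySem.List.pyGetD Q j []) i v)

-- outer 'for i in range(n)' loop body of build_qubo
def build_qubo_outer (A : List Int) (total n : Int) (Q : List (List Int)) (i : Int) : List (List Int) :=
  let Q := PySem.List.pySetD Q i (PySem.List.pySetD (PySem.List.pyGetD Q i []) i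
    (4 * PySem.List.pyGetD A i 0 ^ 2 - 4 * PySem.List.pyGetD A i 0 * total))
  (PySem.List.pyRange (i + 1) n 1).foldl (build_qubo_inner A i) Q

def build_qubo (A : List Int) : List (List Int) :=
  let n : Int := PySem.List.len A
  let Q : List (List Int) := (PySem.List.pyRange 0 n 1).map (fun _ => PySem.List.pyRepeat [(0 : Int)] n)
  let total : Int := A.sum
  (PySem.List.pyRange 0 n 1).foldl (build_qubo_outer A total n) Q

def evaluate_partial (x : List (Option Int)) (Q : List (List Int)) : Int :=
  let xv : List Int := x.map (fun b => b.getD 0)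
  let n : Int := PySem.List.len x
  (PySem.List.pyRange 0 n 1).foldl (fun val i =>
    (PySem.List.pyRange 0 n 1).foldl (fun val j =>
      val + PySem.List.pyGetD xv i 0 * PySem.List.pyGetD (PySem.List.pyGetD Q i []) j 0
          * PySem.List.pyGetD xv j 0) val) 0

-- 'for depth in range(n)' loop body of beam_search_partition
def bsp_stepA (Q : List (List Int)) (beta : Int) (beam : List (List (Option Int))) (depth : Int) :
    List (List (Option Int)) :=
  let candidates : List (Int × List (Option Int)) :=
    beam.foldl (fun cs node =>
      [(0 : Int), 1].foldl (fun cs bit =>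
        let new_node := PySem.List.pySetD node depth (some bit)
        let val := evaluate_partial new_node Q
        cs ++ [(val, new_node)]) cs) []
  let candidates := PySem.List.sorted candidates (fun c => c.1) false
  (PySem.List.slice candidates none (some beta)).map (fun c => c.2)

def beam_search_partition (A : List Int) (beta : Int) : List Int × List Int × List Int × Int :=
  let n : Int := PySem.List.len A
  let Q := build_qubo A
  let beam : List (List (Option Int)) := [PySem.List.pyRepeat [(none : Option Int)] n]
  let beam := (PySem.List.pyRange 0 n 1).foldl (bsp_stepA Q beta) beam
  match PySem.List.min? (beam.map (fun node => (evaluate_partial node Q, node))) (fun c => c.1) with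
  | none => ([], [], [], 0)   -- unreachable under Pre_: Python's min raises ValueError on an empty beam
  | some (best_val, best_node) =>
    -- after the full assignment every entry of best_node is 'some bit'; .getD 0 only unwraps the Option
    let best : List Int := best_node.map (fun o => o.getD 0)
    let E := ((A.zip best).filter (fun ax => ax.2 == 1)).map (fun ax => ax.1)
    let F := ((A.zip best).filter (fun ax => ax.2 == 0)).map (fun ax => ax.1)
    (best, E, F, best_val)

-- ===== PORT B =====

-- 'for d in range(n)' loop body of B: nodes are (val, s, prefix), updated incrementally
def bsp_stepB (A : List Int) (total beta : Int) (beam : List (Int × Int × List Int)) (d : Int) :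
    List (Int × Int × List Int) :=
  let a := PySem.List.pyGetD A d 0
  let candidates : List (Int × Int × List Int) :=
    beam.foldl (fun cs c =>
      cs ++ [(c.1, c.2.1, c.2.2 ++ [0]),
             (c.1 + 4 * a * a - 4 * a * total + 8 * a * c.2.1, c.2.1 + a, c.2.2 ++ [1])]) []
  let candidates := PySem.List.sorted candidates (fun c => c.1) false
  PySem.List.slice candidates none (some beta)

def beam_search_partition_alt (A : List Int) (beta : Int) : List Int × List Int × List Int × Int :=
  let n : Int := PySem.List.len A
  let total : Int := A.sum
  let beam : List (Int × Int × List Int) := [(0, 0, [])]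
  let beam := (PySem.List.pyRange 0 n 1).foldl (bsp_stepB A total beta) beam
  match PySem.List.min? beam (fun c => c.1) with
  | none => ([], [], [], 0)   -- unreachable under Pre_: Python's min raises ValueError on an empty beam
  | some (best_val, _, best) =>
    let E := ((A.zip best).filter (fun ax => ax.2 == 1)).map (fun ax => ax.1)
    let F := ((A.zip best).filter (fun ax => ax.2 == 0)).map (fun ax => ax.1)
    (best, E, F, best_val)

-- ===== PRECONDITION & SPEC =====
-- A raises ValueError (min of an empty final beam) exactly when the input list is nonempty while
-- beta is zero or at most -2: the slice candidates[:beta] then empties the beam. Only those inputs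
-- are excluded; B raises there too.
def Pre_beam_search_partition (A : List Int) (beta : Int) : Prop :=
  A = [] ∨ 1 ≤ beta ∨ beta = -1
instance (A : List Int) (beta : Int) : Decidable (Pre_beam_search_partition A beta) := by
  unfold Pre_beam_search_partition; infer_instance

def pvWitness_beam_search_partition : List Int × Int := ([3, 1, 2], 2)

def Spec_beam_search_partition (A : List Int) (beta : Int) (out : List Int × List Int × List Int × Int) : Prop :=
  out = beam_search_partition_alt A beta
instance (A : List Int) (beta : Int) (out : List Int × List Int × List Int × Int) :
    Decidable (Spec_beam_search_partition A beta out) := by unfold Spec_beam_search_partition; infer_instance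

-- ===== CLAIM (what is proved, stated in full; the proofs are below) =====
def Claim_equal_beam_search_partition : Prop := ∀ (A : List Int) (beta : Int), Dom_beam_search_partition A beta → Pre_beam_search_partition A beta → Spec_beam_search_partition A beta (beam_search_partition A beta)

-- ===== LEMMAS AND PROOFS =====

-- target entry of the QUBO matrix
def tgtF (A : List Int) (i j : Nat) : Int :=
  if i = j then 4 * (A.getD i 0) ^ 2 - 4 * A.getD i 0 * A.sum else 4 * A.getD i 0 * A.getD j 0

-- matrix state after outer iterations < i are done and, within iteration i, the diagonal is set
-- and the inner loop has processed columns < j  (entry (r,c) is set iff min r c < i, or min r c = i ∧ max r c < j)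
def qrowP (A : List Int) (i j r : Nat) : List Int :=
  (List.range A.length).map (fun c => if min r c < i ∨ (min r c = i ∧ max r c < j) then tgtF A r c else 0)

def qmatP (A : List Int) (i j : Nat) : List (List Int) :=
  (List.range A.length).map (qrowP A i j)

-- value and 1-side sum of a fully explicit prefix
def qvalP (A : List Int) (p : List Int) : Int :=
  ((List.range p.length).map (fun i =>
    ((List.range p.length).map (fun j => p.getD i 0 * tgtF A i j * p.getD j 0)).sum)).sum

def ssumP (A : List Int) (p : List Int) : Int :=
  ((List.range p.length).map (fun j => p.getD j 0 * A.getD j 0)).sum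

def exP (node : List (Option Int)) : List Int := node.filterMap id

def GP (A : List Int) (node : List (Option Int)) : Int × Int × List Int :=
  (qvalP A (exP node), ssumP A (exP node), exP node)

def ShapeP (A : List Int) (d : Nat) (node : List (Option Int)) : Prop :=
  ∃ p : List Int, p.length = d ∧ node = p.map some ++ List.replicate (A.length - d) none

def InvP (A : List Int) (d : Nat) (bA : List (List (Option Int))) (bB : List (Int × Int × List Int)) : Prop :=
  bB = bA.map (GP A) ∧ (∀ node ∈ bA, ShapeP A d node) ∧ bA ≠ []


lemma set_map_range {β : Type} (g : Nat → β) {m i : Nat} (hi : i < m) (v : β) :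
    ((List.range m).map g).set i v = (List.range m).map (fun r => if r = i then v else g r) := by
  apply List.ext_getElem (by simp)
  intro k h1 h2
  simp only [List.getElem_set, List.getElem_map, List.getElem_range] at *
  by_cases h : i = k
  · simp [h]
  · simp only [if_neg h, if_neg (fun hh : k = i => h hh.symm)]

lemma flatMap_congr_mem {α β : Type} {l : List α} {g g' : α → List β}
    (h : ∀ x ∈ l, g x = g' x) : l.flatMap g = l.flatMap g' := by
  induction l with
  | nil => rfl
  | cons x xs ih =>
    simp only [List.flatMap_cons, h x (by simp)]
    rw [ih (fun y hy => h y (by simp [hy]))]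

lemma insertBy_map {α β : Type} (key : α → Int) (key' : β → Int) (f : α → β)
    (hk : ∀ a, key' (f a) = key a) (x : α) (l : List α) :
    PySem.List.insertBy (fun a b => decide (key' a < key' b)) (f x) (l.map f)
      = (PySem.List.insertBy (fun a b => decide (key a < key b)) x l).map f := by
  induction l with
  | nil => simp [PySem.List.insertBy]
  | cons y ys ih =>
    simp only [List.map_cons, PySem.List.insertBy, hk]
    split
    · simp
    · simp [ih]

lemma sorted_map_aux {α β : Type} (key : α → Int) (key' : β → Int) (f : α → β)
    (hk : ∀ a, key' (f a) = key a) (l acc : List α) :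
    (l.map f).foldl (fun acc x => PySem.List.insertBy (fun a b => decide (key' a < key' b)) x acc) (acc.map f)
      = (l.foldl (fun acc x => PySem.List.insertBy (fun a b => decide (key a < key b)) x acc) acc).map f := by
  induction l generalizing acc with
  | nil => rfl
  | cons y ys ih =>
    simp only [List.map_cons, List.foldl_cons]
    rw [insertBy_map key key' f hk, ih]

lemma sorted_map {α β : Type} (key : α → Int) (key' : β → Int) (f : α → β)
    (hk : ∀ a, key' (f a) = key a) (l : List α) :
    PySem.List.sorted (l.map f) key' false = (PySem.List.sorted l key false).map f := by
  rw [PySem.List.sorted_eq_foldl_insertBy, PySem.List.sorted_eq_foldl_insertBy]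
  simpa using sorted_map_aux key key' f hk l []

lemma slice_map {α β : Type} (f : α → β) (l : List α) (b : Int) :
    PySem.List.slice (l.map f) none (some b) = (PySem.List.slice l none (some b)).map f := by
  simp [PySem.List.slice, List.map_take]

lemma min?_map_aux {α β : Type} (key : α → Int) (key' : β → Int) (f : α → β)
    (hk : ∀ a, key' (f a) = key a) (l : List α) (acc : Option α) :
    (l.map f).foldl (fun acc x => match acc with
      | none => some x
      | some m => if key' x < key' m then some x else some m) (acc.map f)
      = (l.foldl (fun acc x => match acc with
      | none => some x
      | some m => if key x < key m then some x else some m) acc).map f := by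
  induction l generalizing acc with
  | nil => rfl
  | cons y ys ih =>
    simp only [List.map_cons, List.foldl_cons]
    cases acc with
    | none => exact ih (some y)
    | some m =>
      simp only [Option.map_some, hk]
      split
      · rw [← Option.map_some (f := f)]; exact ih (some y)
      · rw [← Option.map_some (f := f)]; exact ih (some m)

lemma min?_map {α β : Type} (key : α → Int) (key' : β → Int) (f : α → β)
    (hk : ∀ a, key' (f a) = key a) (l : List α) :
    PySem.List.min? (l.map f) key' = (PySem.List.min? l key).map f := by
  unfold PySem.List.min?
  simpa using min?_map_aux key key' f hk l none

lemma qmat_row (A : List Int) (i j r : Nat) (hr : r < A.length) :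
    PySem.List.pyGetD (qmatP A i j) (r : Int) [] = qrowP A i j r := by
  simp only [qmatP, PySem.List.pyGetD_natCast]
  exact PySem.List.getD_map_range _ _ _ _ hr

lemma qmat_set_row (A : List Int) (i j r : Nat) (hr : r < A.length) (row : List Int) :
    PySem.List.pySetD (qmatP A i j) (r : Int) row
      = (List.range A.length).map (fun r' => if r' = r then row else qrowP A i j r') := by
  simp only [qmatP, PySem.List.pySetD_natCast]
  exact set_map_range _ hr row

lemma qrow_set (A : List Int) (i j r c : Nat) (hc : c < A.length) (v : Int) :
    PySem.List.pySetD (qrowP A i j r) (c : Int) v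
      = (List.range A.length).map (fun c' => if c' = c then v
          else if min r c' < i ∨ (min r c' = i ∧ max r c' < j) then tgtF A r c' else 0) := by
  simp only [qrowP, PySem.List.pySetD_natCast]
  exact set_map_range _ hc v

lemma diag_step (A : List Int) (i : Nat) (hi : i < A.length) :
    PySem.List.pySetD (qmatP A i i) (i : Int)
      (PySem.List.pySetD (PySem.List.pyGetD (qmatP A i i) (i : Int) []) (i : Int)
        (4 * PySem.List.pyGetD A (i : Int) 0 ^ 2 - 4 * PySem.List.pyGetD A (i : Int) 0 * A.sum))
      = qmatP A i (i + 1) := by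
  rw [qmat_row A i i i hi, qmat_set_row A i i i hi, qrow_set A i i i i hi, qmatP]
  apply List.map_congr_left
  intro r hr
  simp only [List.mem_range] at hr
  by_cases hri : r = i
  · subst hri
    rw [if_pos rfl, qrowP]
    apply List.map_congr_left
    intro c hc
    simp only [List.mem_range] at hc
    by_cases hci : c = r
    · subst hci
      rw [if_pos rfl, if_pos (by omega : min c c < c ∨ (min c c = c ∧ max c c < c + 1))]
      simp [tgtF, PySem.List.pyGetD_natCast]
    · rw [if_neg hci]
      split_ifs with h2 h3 h3 <;> first | rfl | omega
  · rw [if_neg hri, qrowP, qrowP]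
    apply List.map_congr_left
    intro c hc
    simp only [List.mem_range] at hc
    split_ifs with h2 h3 h3 <;> first | rfl | omega

lemma inner_step (A : List Int) (i j : Nat) (hij : i < j) (hj : j < A.length) :
    build_qubo_inner A (i : Int) (qmatP A i j) (j : Int) = qmatP A i (j + 1) := by
  have hi : i < A.length := lt_trans hij hj
  have hji : ¬(j = i) := by omega
  unfold build_qubo_inner
  dsimp only
  rw [qmat_row A i j i hi, qrow_set A i j i j hj, qmat_set_row A i j i hi]
  -- second get: row j of the once-updated matrix
  rw [show PySem.List.pyGetD
        ((List.range A.length).map (fun r' => if r' = i then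
          ((List.range A.length).map (fun c' => if c' = j
              then 4 * PySem.List.pyGetD A (i : Int) 0 * PySem.List.pyGetD A (j : Int) 0
              else if min i c' < i ∨ (min i c' = i ∧ max i c' < j) then tgtF A i c' else 0))
          else qrowP A i j r')) (j : Int) []
      = qrowP A i j j from by
    simp only [PySem.List.pyGetD_natCast]
    rw [PySem.List.getD_map_range _ _ _ _ hj, if_neg hji]]
  rw [qrow_set A i j j i hi]
  simp only [PySem.List.pySetD_natCast]
  rw [set_map_range _ hj]
  rw [qmatP]
  apply List.map_congr_left
  intro r hr
  simp only [List.mem_range] at hr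
  by_cases hrj : r = j
  · subst hrj
    rw [if_pos rfl, qrowP]
    apply List.map_congr_left
    intro c hc
    simp only [List.mem_range] at hc
    by_cases hci : c = i
    · subst hci
      rw [if_pos rfl, if_pos (by omega : min r c < c ∨ (min r c = c ∧ max r c < r + 1))]
      simp only [PySem.List.pyGetD_natCast, tgtF, if_neg (by omega : ¬(r = c))]
      ring
    · rw [if_neg hci]
      split_ifs with h2 h3 h3 <;> first | rfl | omega
  · rw [if_neg hrj]
    by_cases hri : r = i
    · subst hri
      rw [if_pos rfl, qrowP]
      apply List.map_congr_left
      intro c hc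
      simp only [List.mem_range] at hc
      by_cases hcj : c = j
      · subst hcj
        rw [if_pos rfl, if_pos (by omega : min r c < r ∨ (min r c = r ∧ max r c < c + 1))]
        simp only [PySem.List.pyGetD_natCast, tgtF, if_neg (by omega : ¬(r = c))]
      · rw [if_neg hcj]
        split_ifs with h2 h3 h3 <;> first | rfl | omega
    · rw [if_neg hri, qrowP, qrowP]
      apply List.map_congr_left
      intro c hc
      simp only [List.mem_range] at hc
      split_ifs with h2 h3 h3 <;> first | rfl | omega

lemma inner_loop (A : List Int) (i : Nat) :
    ∀ j : Nat, i + 1 ≤ j → j ≤ A.length →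
      (PySem.List.pyRange ((i : Int) + 1) (j : Int) 1).foldl (build_qubo_inner A (i : Int))
        (qmatP A i (i + 1)) = qmatP A i j := by
  intro j
  induction j with
  | zero => intro h1 h2; omega
  | succ j ih =>
    intro h1 h2
    by_cases hbase : i + 1 = j + 1
    · have hij : i = j := by omega
      subst hij
      rw [show ((i + 1 : Nat) : Int) = (i : Int) + 1 by push_cast; ring]
      rw [PySem.List.pyRange_one_eq_nil (le_refl _)]
      rfl
    · have hij : i + 1 ≤ j := by omega
      rw [show ((j + 1 : Nat) : Int) = (j : Int) + 1 by push_cast; ring]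
      rw [PySem.List.pyRange_one_succ_right (by exact_mod_cast Nat.add_one_le_iff.mpr (by omega) : ((i : Int) + 1) ≤ (j : Int))]
      rw [List.foldl_append]
      simp only [List.foldl_cons, List.foldl_nil]
      rw [ih hij (by omega)]
      exact inner_step A i j (by omega) (by omega)

lemma qmat_phase (A : List Int) (i : Nat) :
    qmatP A i A.length = qmatP A (i + 1) (i + 1) := by
  unfold qmatP qrowP
  apply List.map_congr_left
  intro r hr
  simp only [List.mem_range] at hr
  apply List.map_congr_left
  intro c hc
  simp only [List.mem_range] at hc
  split_ifs with h2 h3 h3 <;> first | rfl | omega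

lemma outer_step (A : List Int) (i : Nat) (hi : i < A.length) :
    build_qubo_outer A A.sum (A.length : Int) (qmatP A i i) (i : Int) = qmatP A (i + 1) (i + 1) := by
  unfold build_qubo_outer
  dsimp only
  rw [diag_step A i hi]
  rw [inner_loop A i A.length (by omega) (le_refl _)]
  exact qmat_phase A i

lemma qmat_init (A : List Int) :
    (PySem.List.pyRange 0 (A.length : Int) 1).map (fun _ => PySem.List.pyRepeat [(0 : Int)] (A.length : Int))
      = qmatP A 0 0 := by
  rw [PySem.List.pyRange_zero_nat]
  unfold qmatP
  rw [List.map_map]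
  apply List.map_congr_left
  intro r _
  rw [PySem.List.pyRepeat_singleton, show ((A.length : Int).toNat) = A.length by omega]
  unfold qrowP
  rw [List.map_congr_left (l := List.range A.length)
    (f := fun c => if min r c < 0 ∨ (min r c = 0 ∧ max r c < 0) then tgtF A r c else 0)
    (g := fun _ => (0 : Int)) (fun c _ => by simp only []; rw [if_neg (by omega)])]
  simp [List.map_const']

lemma outer_loop (A : List Int) :
    ∀ i : Nat, i ≤ A.length →
      (PySem.List.pyRange 0 (i : Int) 1).foldl (build_qubo_outer A A.sum (A.length : Int))
        ((PySem.List.pyRange 0 (A.length : Int) 1).map (fun _ => PySem.List.pyRepeat [(0 : Int)] (A.length : Int)))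
        = qmatP A i i := by
  intro i
  induction i with
  | zero =>
    intro _
    rw [show ((0 : Nat) : Int) = 0 by rfl, PySem.List.pyRange_one_eq_nil (le_refl _)]
    rw [List.foldl_nil, qmat_init]
  | succ i ih =>
    intro h
    rw [show ((i + 1 : Nat) : Int) = (i : Int) + 1 by push_cast; ring]
    rw [PySem.List.pyRange_one_succ_right (by positivity : (0 : Int) ≤ (i : Int))]
    rw [List.foldl_append]
    simp only [List.foldl_cons, List.foldl_nil]
    rw [ih (by omega)]
    exact outer_step A i (by omega)

lemma build_qubo_eq' (A : List Int) : build_qubo A = qmatP A A.length A.length := by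
  unfold build_qubo
  dsimp only
  rw [show PySem.List.len A = (A.length : Int) from by simp]
  exact outer_loop A A.length (le_refl _)

lemma qrow_entry (A : List Int) (i j r c : Nat) (hc : c < A.length) :
    PySem.List.pyGetD (qrowP A i j r) (c : Int) 0
      = if min r c < i ∨ (min r c = i ∧ max r c < j) then tgtF A r c else 0 := by
  simp only [qrowP, PySem.List.pyGetD_natCast]
  exact PySem.List.getD_map_range _ _ _ _ hc

lemma qmat_entry' (A : List Int) {r c : Nat} (hr : r < A.length) (hc : c < A.length) :
    PySem.List.pyGetD (PySem.List.pyGetD (qmatP A A.length A.length) (r : Int) []) (c : Int) 0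
      = tgtF A r c := by
  rw [qmat_row A _ _ r hr, qrow_entry A _ _ r c hc, if_pos (by omega)]

lemma getD_append_zero (p : List Int) (k i : Nat) :
    (p ++ List.replicate k (0 : Int)).getD i 0 = p.getD i 0 := by
  by_cases h : i < p.length
  · rw [List.getD_append _ _ _ _ h]
  · simp only [List.getD_eq_getElem?_getD]
    rw [List.getElem?_append_right (by omega), List.getElem?_replicate,
      List.getElem?_eq_none (by omega)]
    split <;> rfl

lemma getD_concat_lt (p : List Int) (b : Int) {i : Nat} (h : i < p.length) :
    (p ++ [b]).getD i 0 = p.getD i 0 := List.getD_append _ _ _ _ h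

lemma getD_concat_self (p : List Int) (b : Int) :
    (p ++ [b]).getD p.length 0 = b := by
  simp only [List.getD_eq_getElem?_getD]
  rw [List.getElem?_append_right (le_refl _)]
  simp

lemma ssum_append' (A : List Int) (p : List Int) (b : Int) :
    ssumP A (p ++ [b]) = ssumP A p + b * A.getD p.length 0 := by
  unfold ssumP
  simp only [List.length_append, List.length_cons, List.length_nil, List.range_succ,
    List.map_append, List.sum_append, List.map_cons, List.map_nil, List.sum_cons, List.sum_nil]
  rw [getD_concat_self]
  have h1 : (List.range p.length).map (fun j => (p ++ [b]).getD j 0 * A.getD j 0)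
      = (List.range p.length).map (fun j => p.getD j 0 * A.getD j 0) :=
    List.map_congr_left (fun j hj => by
      rw [show ((p ++ [b]).getD j 0) = p.getD j 0 from getD_concat_lt p b (List.mem_range.mp hj)])
  rw [h1]
  ring

lemma sum_shrink (f : Nat → Int) (d k : Nat) (h : ∀ i, d ≤ i → f i = 0) :
    ((List.range (d + k)).map f).sum = ((List.range d).map f).sum := by
  rw [List.range_add, List.map_append, List.sum_append, List.map_map]
  have h1 : (List.range k).map (f ∘ fun x => d + x) = (List.range k).map (fun _ => (0 : Int)) :=
    List.map_congr_left (fun i _ => by simp only [Function.comp]; exact h (d + i) (by omega))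
  rw [h1]
  simp

lemma qval_append' (A : List Int) (p : List Int) (b : Int) :
    qvalP A (p ++ [b]) = qvalP A p + 8 * A.getD p.length 0 * b * ssumP A p
      + b * b * (4 * (A.getD p.length 0) ^ 2 - 4 * A.getD p.length 0 * A.sum) := by
  unfold qvalP
  simp only [List.length_append, List.length_cons, List.length_nil, List.range_succ,
    List.map_append, List.sum_append, List.map_cons, List.map_nil, List.sum_cons, List.sum_nil]
  have houter : (List.range p.length).map (fun i =>
        ((List.range p.length).map (fun j => (p ++ [b]).getD i 0 * tgtF A i j * (p ++ [b]).getD j 0)).sum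
          + ((p ++ [b]).getD i 0 * tgtF A i p.length * (p ++ [b]).getD p.length 0 + 0))
      = (List.range p.length).map (fun i =>
        ((List.range p.length).map (fun j => p.getD i 0 * tgtF A i j * p.getD j 0)).sum
          + 4 * A.getD p.length 0 * b * (p.getD i 0 * A.getD i 0)) := by
    apply List.map_congr_left
    intro i hi
    have hi' := List.mem_range.mp hi
    have hinner : (List.range p.length).map (fun j => (p ++ [b]).getD i 0 * tgtF A i j * (p ++ [b]).getD j 0)
        = (List.range p.length).map (fun j => p.getD i 0 * tgtF A i j * p.getD j 0) := by
      apply List.map_congr_left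
      intro j hj
      rw [show ((p ++ [b]).getD i 0) = p.getD i 0 from getD_concat_lt p b hi',
        show ((p ++ [b]).getD j 0) = p.getD j 0 from getD_concat_lt p b (List.mem_range.mp hj)]
    rw [hinner, getD_concat_self, show ((p ++ [b]).getD i 0) = p.getD i 0 from getD_concat_lt p b hi']
    rw [show tgtF A i p.length = 4 * A.getD i 0 * A.getD p.length 0 from by
      unfold tgtF; rw [if_neg (by omega)]]
    ring
  rw [houter, PySem.List.sum_map_add_int]
  have hdrow : (List.range p.length).map (fun j =>
        (p ++ [b]).getD p.length 0 * tgtF A p.length j * (p ++ [b]).getD j 0)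
      = (List.range p.length).map (fun j => 4 * A.getD p.length 0 * b * (p.getD j 0 * A.getD j 0)) := by
    apply List.map_congr_left
    intro j hj
    have hj' := List.mem_range.mp hj
    rw [show ((p ++ [b]).getD j 0) = p.getD j 0 from getD_concat_lt p b hj',
      getD_concat_self]
    rw [show tgtF A p.length j = 4 * A.getD p.length 0 * A.getD j 0 from by
      unfold tgtF; rw [if_neg (by omega : ¬(p.length = j))]]
    ring
  rw [hdrow, getD_concat_self]
  rw [List.sum_map_mul_left]
  rw [show tgtF A p.length p.length = 4 * (A.getD p.length 0) ^ 2 - 4 * A.getD p.length 0 * A.sum from by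
    unfold tgtF; rw [if_pos rfl]]
  unfold ssumP
  ring

lemma ex_shape' (p : List Int) (k : Nat) : exP (p.map some ++ List.replicate k none) = p := by
  unfold exP
  simp

lemma set_node' (p : List Int) (k : Nat) (b : Int) :
    PySem.List.pySetD (p.map some ++ List.replicate (k + 1) none) (p.length : Int) (some b)
      = (p ++ [b]).map some ++ List.replicate k none := by
  simp only [PySem.List.pySetD_natCast]
  rw [List.set_append]
  rw [if_neg (by simp)]
  simp [List.replicate_succ]

lemma foldl_pyRange_sum (n : Nat) (t : Int → Int) (v : Int) :
    (PySem.List.pyRange 0 (n : Int) 1).foldl (fun val j => val + t j) v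
      = v + ((List.range n).map (fun (j : Nat) => t (j : Int))).sum := by
  rw [PySem.List.pyRange_zero_nat, List.foldl_map, PySem.List.foldl_add]

lemma evaluate_eq' (A : List Int) (p : List Int) (k : Nat) (hk : p.length + k = A.length) :
    evaluate_partial (p.map some ++ List.replicate k none) (build_qubo A) = qvalP A p := by
  unfold evaluate_partial
  dsimp only
  have hxv : (p.map some ++ List.replicate k none).map (fun b : Option Int => b.getD 0)
      = p ++ List.replicate k (0 : Int) := by
    simp [List.map_map]
  have hlen : PySem.List.len (p.map some ++ List.replicate k none) = ((p.length + k : Nat) : Int) := by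
    simp
  rw [hxv, hlen]
  rw [PySem.List.foldl_congr_mem _ _
    (fun val i => val + ((List.range (p.length + k)).map (fun j =>
      PySem.List.pyGetD (p ++ List.replicate k (0:Int)) i 0
        * PySem.List.pyGetD (PySem.List.pyGetD (build_qubo A) i []) ((j : Nat) : Int) 0
        * PySem.List.pyGetD (p ++ List.replicate k (0:Int)) ((j : Nat) : Int) 0)).sum) _
    (fun acc i _ => foldl_pyRange_sum (p.length + k) _ acc)]
  rw [foldl_pyRange_sum, zero_add]
  -- now a pure double sum over List.range; rewrite entries and shrink to range p.length
  have hA : p.length ≤ A.length := by omega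
  have hout : (List.range (p.length + k)).map (fun i => ((List.range (p.length + k)).map (fun j =>
        PySem.List.pyGetD (p ++ List.replicate k (0:Int)) ((i : Nat) : Int) 0
          * PySem.List.pyGetD (PySem.List.pyGetD (build_qubo A) ((i : Nat) : Int) []) ((j : Nat) : Int) 0
          * PySem.List.pyGetD (p ++ List.replicate k (0:Int)) ((j : Nat) : Int) 0)).sum)
      = (List.range (p.length + k)).map (fun i => ((List.range (p.length + k)).map (fun j =>
          p.getD i 0 * PySem.List.pyGetD (PySem.List.pyGetD (build_qubo A) ((i : Nat) : Int) []) ((j : Nat) : Int) 0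
            * p.getD j 0)).sum) := by
    apply List.map_congr_left
    intro i _
    congr 1
    apply List.map_congr_left
    intro j _
    simp only [PySem.List.pyGetD_natCast, getD_append_zero]
  rw [hout]
  rw [sum_shrink _ p.length k (fun i hi => by
    have h0 : p.getD i 0 = 0 := List.getD_eq_default _ _ (by omega)
    rw [show ((List.range (p.length + k)).map (fun j =>
        p.getD i 0 * PySem.List.pyGetD (PySem.List.pyGetD (build_qubo A) ((i : Nat) : Int) []) ((j : Nat) : Int) 0
          * p.getD j 0)) = (List.range (p.length + k)).map (fun _ => (0 : Int)) from
      List.map_congr_left (fun j _ => by rw [h0, zero_mul, zero_mul])]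
    simp)]
  unfold qvalP
  congr 1
  apply List.map_congr_left
  intro i hi
  have hi' := List.mem_range.mp hi
  rw [sum_shrink _ p.length k (fun j hj => by
    rw [List.getD_eq_default _ _ (by omega : p.length ≤ j), mul_zero])]
  congr 1
  apply List.map_congr_left
  intro j hj
  have hj' := List.mem_range.mp hj
  rw [build_qubo_eq', qmat_entry' A (by omega) (by omega)]

-- candidate-pair projection: from A's (val, node) to B's (val, s, prefix)
def FP (A : List Int) (c : Int × List (Option Int)) : Int × Int × List Int :=
  (c.1, ssumP A (exP c.2), exP c.2)

lemma node_new (A : List Int) {d : Nat} (hd : d < A.length) {node : List (Option Int)}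
    {p : List Int} (hp : p.length = d) (hnode : node = p.map some ++ List.replicate (A.length - d) none)
    (b : Int) :
    exP node = p ∧
    exP (PySem.List.pySetD node (d : Int) (some b)) = p ++ [b] ∧
    evaluate_partial (PySem.List.pySetD node (d : Int) (some b)) (build_qubo A) = qvalP A (p ++ [b]) ∧
    ShapeP A (d + 1) (PySem.List.pySetD node (d : Int) (some b)) := by
  subst hp
  have hrep : A.length - p.length = (A.length - (p.length + 1)) + 1 := by omega
  have hset : PySem.List.pySetD node ((p.length : Nat) : Int) (some b)
      = (p ++ [b]).map some ++ List.replicate (A.length - (p.length + 1)) none := by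
    rw [hnode, hrep]
    exact set_node' p (A.length - (p.length + 1)) b
  refine ⟨by rw [hnode]; exact ex_shape' p _, ?_, ?_, ?_⟩
  · rw [hset]; exact ex_shape' (p ++ [b]) _
  · rw [hset]
    exact evaluate_eq' A (p ++ [b]) _ (by simp; omega)
  · exact ⟨p ++ [b], by simp, hset⟩

lemma cand_mem (A : List Int) {d : Nat} (hd : d < A.length)
    {bA : List (List (Option Int))} (hsh : ∀ node ∈ bA, ShapeP A d node)
    {c : Int × List (Option Int)}
    (hc : c ∈ bA.flatMap (fun node =>
      [(evaluate_partial (PySem.List.pySetD node (d : Int) (some 0)) (build_qubo A),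
        PySem.List.pySetD node (d : Int) (some 0)),
       (evaluate_partial (PySem.List.pySetD node (d : Int) (some 1)) (build_qubo A),
        PySem.List.pySetD node (d : Int) (some 1))])) :
    FP A c = GP A c.2 ∧ ShapeP A (d + 1) c.2 := by
  simp only [List.mem_flatMap, List.mem_cons] at hc
  obtain ⟨node, hmem, hc⟩ := hc
  obtain ⟨p, hp, hnode⟩ := hsh node hmem
  rcases hc with hc | hc | hc
  · obtain ⟨_, hex, hev, hsh'⟩ := node_new A hd hp hnode 0
    subst hc
    refine ⟨?_, hsh'⟩
    simp only [FP, GP]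
    rw [hex, hev]
  · obtain ⟨_, hex, hev, hsh'⟩ := node_new A hd hp hnode 1
    subst hc
    refine ⟨?_, hsh'⟩
    simp only [FP, GP]
    rw [hex, hev]
  · cases hc

lemma step_inv' (A : List Int) (beta : Int) (hb : 1 ≤ beta ∨ beta = -1) (d : Nat)
    (hd : d < A.length) (bA : List (List (Option Int))) (bB : List (Int × Int × List Int))
    (h : InvP A d bA bB) :
    InvP A (d + 1) (bsp_stepA (build_qubo A) beta bA (d : Int)) (bsp_stepB A A.sum beta bB (d : Int)) := by
  obtain ⟨h1, h2, h3⟩ := h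
  unfold bsp_stepA bsp_stepB
  dsimp only
  have hcA : bA.foldl (fun cs node =>
        [(0 : Int), 1].foldl (fun cs bit =>
          cs ++ [(evaluate_partial (PySem.List.pySetD node (d : Int) (some bit)) (build_qubo A),
                  PySem.List.pySetD node (d : Int) (some bit))]) cs) []
      = bA.flatMap (fun node =>
          [(evaluate_partial (PySem.List.pySetD node (d : Int) (some 0)) (build_qubo A),
            PySem.List.pySetD node (d : Int) (some 0)),
           (evaluate_partial (PySem.List.pySetD node (d : Int) (some 1)) (build_qubo A),
            PySem.List.pySetD node (d : Int) (some 1))]) := by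
    rw [PySem.List.foldl_congr_mem _ _ (fun cs node => cs ++
        [(evaluate_partial (PySem.List.pySetD node (d : Int) (some 0)) (build_qubo A),
          PySem.List.pySetD node (d : Int) (some 0)),
         (evaluate_partial (PySem.List.pySetD node (d : Int) (some 1)) (build_qubo A),
          PySem.List.pySetD node (d : Int) (some 1))]) _
      (fun acc x _ => by simp)]
    exact PySem.List.foldl_append_eq_flatMap _ _ []
  have hcB : bB.foldl (fun cs c =>
        cs ++ [(c.1, c.2.1, c.2.2 ++ [0]),
               (c.1 + 4 * PySem.List.pyGetD A (d : Int) 0 * PySem.List.pyGetD A (d : Int) 0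
                  - 4 * PySem.List.pyGetD A (d : Int) 0 * A.sum
                  + 8 * PySem.List.pyGetD A (d : Int) 0 * c.2.1,
                c.2.1 + PySem.List.pyGetD A (d : Int) 0, c.2.2 ++ [1])]) []
      = bB.flatMap (fun c =>
          [(c.1, c.2.1, c.2.2 ++ [0]),
           (c.1 + 4 * PySem.List.pyGetD A (d : Int) 0 * PySem.List.pyGetD A (d : Int) 0
              - 4 * PySem.List.pyGetD A (d : Int) 0 * A.sum
              + 8 * PySem.List.pyGetD A (d : Int) 0 * c.2.1,
            c.2.1 + PySem.List.pyGetD A (d : Int) 0, c.2.2 ++ [1])]) :=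
    PySem.List.foldl_append_eq_flatMap _ _ []
  rw [hcA, hcB, h1, List.flatMap_map]
  have hptw : ∀ node ∈ bA,
      [((GP A node).1, (GP A node).2.1, (GP A node).2.2 ++ [0]),
       ((GP A node).1 + 4 * PySem.List.pyGetD A (d : Int) 0 * PySem.List.pyGetD A (d : Int) 0
          - 4 * PySem.List.pyGetD A (d : Int) 0 * A.sum
          + 8 * PySem.List.pyGetD A (d : Int) 0 * (GP A node).2.1,
        (GP A node).2.1 + PySem.List.pyGetD A (d : Int) 0, (GP A node).2.2 ++ [1])]
      = ([(evaluate_partial (PySem.List.pySetD node (d : Int) (some 0)) (build_qubo A),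
            PySem.List.pySetD node (d : Int) (some 0)),
          (evaluate_partial (PySem.List.pySetD node (d : Int) (some 1)) (build_qubo A),
            PySem.List.pySetD node (d : Int) (some 1))]).map (FP A) := by
    intro node hmem
    obtain ⟨p, hp, hnode⟩ := h2 node hmem
    obtain ⟨hexn, hexnew0, hev0, _⟩ := node_new A hd hp hnode 0
    obtain ⟨_, hexnew1, hev1, _⟩ := node_new A hd hp hnode 1
    simp only [List.map_cons, List.map_nil, FP, GP, hexn, hexnew0, hev0, hexnew1, hev1]
    rw [qval_append', qval_append', ssum_append', ssum_append', hp]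
    simp only [PySem.List.pyGetD_natCast]
    simp only [List.cons.injEq, Prod.mk.injEq]
    and_intros <;> first | trivial | ring
  rw [show bA.flatMap (fun node =>
      [((GP A node).1, (GP A node).2.1, (GP A node).2.2 ++ [0]),
       ((GP A node).1 + 4 * PySem.List.pyGetD A (d : Int) 0 * PySem.List.pyGetD A (d : Int) 0
          - 4 * PySem.List.pyGetD A (d : Int) 0 * A.sum
          + 8 * PySem.List.pyGetD A (d : Int) 0 * (GP A node).2.1,
        (GP A node).2.1 + PySem.List.pyGetD A (d : Int) 0, (GP A node).2.2 ++ [1])])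
      = (bA.flatMap (fun node =>
          [(evaluate_partial (PySem.List.pySetD node (d : Int) (some 0)) (build_qubo A),
            PySem.List.pySetD node (d : Int) (some 0)),
           (evaluate_partial (PySem.List.pySetD node (d : Int) (some 1)) (build_qubo A),
            PySem.List.pySetD node (d : Int) (some 1))])).map (FP A) from by
    rw [List.map_flatMap]
    exact flatMap_congr_mem hptw]
  rw [sorted_map (fun c => c.1) (fun c => c.1) (FP A) (fun c => rfl)]
  rw [slice_map]
  set cand := bA.flatMap (fun node =>
      [(evaluate_partial (PySem.List.pySetD node (d : Int) (some 0)) (build_qubo A),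
        PySem.List.pySetD node (d : Int) (some 0)),
       (evaluate_partial (PySem.List.pySetD node (d : Int) (some 1)) (build_qubo A),
        PySem.List.pySetD node (d : Int) (some 1))]) with hcand
  set kept := PySem.List.slice (PySem.List.sorted cand (fun c => c.1) false) none (some beta) with hkept
  have hkmem : ∀ c ∈ kept, c ∈ cand := fun c hc =>
    (PySem.List.mem_sorted cand (fun c => c.1) false c).mp (PySem.List.mem_of_mem_slice _ _ _ hc)
  refine ⟨?_, ?_, ?_⟩
  · rw [List.map_map]
    apply List.map_congr_left
    intro c hc
    exact (cand_mem A hd h2 (hkmem c hc)).1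
  · intro nd hnd
    obtain ⟨c, hc, hcnd⟩ := List.mem_map.mp hnd
    rw [← hcnd]
    exact (cand_mem A hd h2 (hkmem c hc)).2
  · -- kept is nonempty
    have hlc : 2 ≤ cand.length := by
      rw [hcand]
      cases bA with
      | nil => exact absurd rfl h3
      | cons x xs => simp [List.length_flatMap]
    have hls : 2 ≤ (PySem.List.sorted cand (fun c => c.1) false).length := by
      rw [PySem.List.length_sorted]; exact hlc
    have : kept ≠ [] := by
      rw [hkept]
      rcases hb with hb | hb
      · rw [PySem.List.slice_to _ (by omega)]
        apply List.ne_nil_of_length_pos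
        rw [List.length_take]
        omega
      · subst hb
        rw [PySem.List.slice_to_neg_one]
        apply List.ne_nil_of_length_pos
        rw [List.length_dropLast]
        omega
    intro hnil
    exact this (List.map_eq_nil_iff.mp hnil)

lemma base_inv (A : List Int) :
    InvP A 0 [List.replicate A.length none] [(0, 0, [])] := by
  refine ⟨?_, ?_, by simp⟩
  · simp only [List.map_cons, List.map_nil, GP]
    have hex : exP (List.replicate A.length (none : Option Int)) = [] := by
      unfold exP; simp
    rw [hex]
    rfl
  · intro node hnode
    simp only [List.mem_singleton] at hnode
    exact ⟨[], rfl, by simp [hnode]⟩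

lemma loop_inv' (A : List Int) (beta : Int) (hb : 1 ≤ beta ∨ beta = -1) :
    ∀ d : Nat, d ≤ A.length →
      InvP A d
        ((PySem.List.pyRange 0 (d : Int) 1).foldl (bsp_stepA (build_qubo A) beta)
          [List.replicate A.length none])
        ((PySem.List.pyRange 0 (d : Int) 1).foldl (bsp_stepB A A.sum beta) [(0, 0, [])]) := by
  intro d
  induction d with
  | zero =>
    intro _
    rw [show ((0 : Nat) : Int) = 0 by rfl, PySem.List.pyRange_one_eq_nil (le_refl _)]
    exact base_inv A
  | succ d ih =>
    intro h
    rw [show ((d + 1 : Nat) : Int) = (d : Int) + 1 by push_cast; ring]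
    rw [PySem.List.pyRange_one_succ_right (by positivity : (0 : Int) ≤ (d : Int))]
    rw [List.foldl_append, List.foldl_append]
    simp only [List.foldl_cons, List.foldl_nil]
    exact step_inv' A beta hb d (by omega) _ _ (ih (by omega))

lemma final_assembly (A : List Int) (beta : Int)
    (bA : List (List (Option Int))) (bB : List (Int × Int × List Int))
    (h : InvP A A.length bA bB) :
    ((match PySem.List.min? (bA.map (fun node => (evaluate_partial node (build_qubo A), node)))
        (fun c => c.1) with
     | none => ([], [], [], 0)
     | some (best_val, best_node) =>
       let best : List Int := best_node.map (fun o : Option Int => o.getD 0)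
       let E := ((A.zip best).filter (fun ax : Int × Int => ax.2 == 1)).map (fun ax : Int × Int => ax.1)
       let F := ((A.zip best).filter (fun ax : Int × Int => ax.2 == 0)).map (fun ax : Int × Int => ax.1)
       (best, E, F, best_val)) : List Int × List Int × List Int × Int)
    = ((match PySem.List.min? bB (fun c => c.1) with
     | none => ([], [], [], 0)
     | some (best_val, _, best) =>
       let E := ((A.zip best).filter (fun ax : Int × Int => ax.2 == 1)).map (fun ax : Int × Int => ax.1)
       let F := ((A.zip best).filter (fun ax : Int × Int => ax.2 == 0)).map (fun ax : Int × Int => ax.1)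
       (best, E, F, best_val)) : List Int × List Int × List Int × Int) := by
  obtain ⟨h1, h2, h3⟩ := h
  have hpair : ∀ node ∈ bA, GP A node = FP A (evaluate_partial node (build_qubo A), node) := by
    intro node hnode
    obtain ⟨p, hp, hnode'⟩ := h2 node hnode
    have hrep : List.replicate (A.length - A.length) (none : Option Int) = [] := by simp
    have hnp : node = p.map some := by rw [hnode', hrep, List.append_nil]
    have hex : exP node = p := by rw [hnode']; exact ex_shape' p _
    have hev : evaluate_partial node (build_qubo A) = qvalP A p := by
      rw [hnode', hrep, List.append_nil, show p.map some = p.map some ++ List.replicate 0 none by simp]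
      exact evaluate_eq' A p 0 (by omega)
    simp only [GP, FP, hex, hev]
  have hmapB : bB = (bA.map (fun node => (evaluate_partial node (build_qubo A), node))).map (FP A) := by
    rw [h1, List.map_map]
    exact List.map_congr_left (fun node hnode => hpair node hnode)
  rw [hmapB, min?_map (fun c => c.1) (fun c => c.1) (FP A) (fun c => rfl)]
  cases hmin : PySem.List.min? (bA.map (fun node => (evaluate_partial node (build_qubo A), node)))
      (fun c => c.1) with
  | none =>
    exfalso
    exact h3 (List.map_eq_nil_iff.mp ((PySem.List.min?_eq_none_iff _ _).mp hmin))
  | some m =>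
    obtain ⟨v, node⟩ := m
    have hmem := PySem.List.min?_mem hmin
    obtain ⟨node', hnode', heq⟩ := List.mem_map.mp hmem
    obtain ⟨p, hp, hshape⟩ := h2 node' hnode'
    have hnp : node' = p.map some := by rw [hshape]; simp
    have hnode2 : node = p.map some := by
      rw [← hnp]
      have := congrArg Prod.snd heq
      simpa using this.symm
    have hexn : exP node = p := by rw [hnode2]; unfold exP; simp
    simp only [Option.map_some, FP]
    rw [hexn, hnode2]
    have hbest : (p.map some).map (fun o : Option Int => o.getD 0) = p := by
      rw [List.map_map]; simp
    rw [hbest]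

-- ===== VERDICT (by name: the statement is the Claim_ definition above) =====
theorem beam_search_partition_spec : Claim_equal_beam_search_partition := by
  intro A beta _ hpre
  unfold Spec_beam_search_partition
  by_cases hA : A = []
  · subst hA; rfl
  · have hb : (1 : Int) ≤ beta ∨ beta = -1 := by
      rcases hpre with h | h | h
      · exact absurd h hA
      · exact Or.inl h
      · exact Or.inr h
    unfold beam_search_partition beam_search_partition_alt
    dsimp only
    rw [show PySem.List.len A = (A.length : Int) by simp]
    rw [show PySem.List.pyRepeat [(none : Option Int)] ((A.length : Nat) : Int)
        = List.replicate A.length none by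
      simp [PySem.List.pyRepeat_singleton]]
    exact final_assembly A beta _ _ (loop_inv' A beta hb A.length (le_refl _))
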